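-- pv_equiv track=rewrite | github.com/julianrosen/mhs | misc.py | S_min_v
-- ===== SOURCE A (Python) =====
-- def S_min_v(r, s):
--     a = [-x for x in s]
--     a.sort()
--     v = 0
--     for i, A in enumerate(a):
--         if A >= 0:
--             break
--         v += A * (r if i == 0 else r - 1)
--     return v
-- ===== SOURCE B (Python) =====
-- def S_min_v(r, s):
--     pos_sum = 0
--     best = 0
--     for x in s:
--         if x > 0:
--             pos_sum += x
--             if x > best:
--                 best = x
--     return -(r - 1) * pos_sum - best
-- ===== Notes on version B (the rewrite author's own statement) =====
-- stated objective: faster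
-- what changed: Replaced A's negate-then-sort-then-scan-until-nonnegative loop with a single linear pass that accumulates the sum of positive elements and the largest positive element, returning -(r-1)*pos_sum - best via the closed form A's weighted scan computes.
import Mathlib
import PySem

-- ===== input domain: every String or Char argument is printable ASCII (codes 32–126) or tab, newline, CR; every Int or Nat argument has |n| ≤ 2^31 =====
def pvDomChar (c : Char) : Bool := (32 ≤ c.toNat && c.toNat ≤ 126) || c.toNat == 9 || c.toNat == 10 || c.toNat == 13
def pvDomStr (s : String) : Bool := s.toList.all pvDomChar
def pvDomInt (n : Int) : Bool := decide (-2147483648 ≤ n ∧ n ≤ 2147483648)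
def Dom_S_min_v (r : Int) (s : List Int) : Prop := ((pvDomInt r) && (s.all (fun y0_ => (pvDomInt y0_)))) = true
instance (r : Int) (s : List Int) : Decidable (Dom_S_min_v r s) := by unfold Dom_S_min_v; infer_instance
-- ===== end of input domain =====

-- B replaces A's negate-sort-and-scan with a single linear pass accumulating the sum of
-- positive elements and the maximum positive element (objective: faster, O(n) vs O(n log n)).


-- ===== PORT A =====
-- 'for i, A in enumerate(a): if A >= 0: break; v += A * (r if i == 0 else r - 1)'
def S_min_v_loopA (r : Int) : List Int → Nat → Int → Int
  | [], _, v => v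
  | A :: rest, i, v =>
    if A ≥ 0 then v
    else S_min_v_loopA r rest (i + 1) (v + A * (if i = 0 then r else r - 1))

def S_min_v (r : Int) (s : List Int) : Int :=
  S_min_v_loopA r (PySem.List.sorted (s.map (fun x => -x)) (fun x => x) false) 0 0

-- ===== PORT B =====
-- single pass: pos_sum = sum of positive elements, best = largest positive element (0 if none)
def S_min_v_altLoop : List Int → Int × Int → Int × Int
  | [], st => st
  | x :: rest, (ps, best) =>
      S_min_v_altLoop rest
        (if x > 0 then (ps + x, if x > best then x else best) else (ps, best))

def S_min_v_alt (r : Int) (s : List Int) : Int :=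
  let st := S_min_v_altLoop s (0, 0);
  -(r - 1) * st.1 - st.2

-- ===== PRECONDITION & SPEC =====
def Spec_S_min_v (r : Int) (s : List Int) (out : Int) : Prop := out = S_min_v_alt r s
instance (r : Int) (s : List Int) (out : Int) : Decidable (Spec_S_min_v r s out) := by unfold Spec_S_min_v; infer_instance

-- ===== CLAIM (what is proved, stated in full; the proofs are below) =====
def Claim_equal_S_min_v : Prop := ∀ (r : Int) (s : List Int), Dom_S_min_v r s → Spec_S_min_v r s (S_min_v r s)

-- ===== LEMMAS AND PROOFS =====

/-- Sum of the positive elements of `s`. -/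
def posSum (s : List Int) : Int := (s.filter (fun x => 0 < x)).sum

lemma posSum_cons_pos (a : Int) (t : List Int) (h : 0 < a) :
    posSum (a :: t) = a + posSum t := by
  simp [posSum, h]

lemma posSum_cons_nonpos (a : Int) (t : List Int) (h : ¬ 0 < a) :
    posSum (a :: t) = posSum t := by
  simp [posSum, h]

/-- B's loop computes the positive sum and the running max (start at `b ≥ 0`). -/
lemma altLoop_spec (s : List Int) (ps b : Int) (hb : 0 ≤ b) :
    S_min_v_altLoop s (ps, b) = (ps + posSum s, s.foldl max b) := by
  induction s generalizing ps b with
  | nil => simp [S_min_v_altLoop, posSum]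
  | cons x t ih =>
    by_cases hx : 0 < x
    · have hmax : (if x > b then x else b) = max b x := by
        rcases le_total x b with h | h
        · simp [max_eq_left h, not_lt.mpr h]
        · simp [max_eq_right h]
          intro h'
          omega
      simp only [S_min_v_altLoop, if_pos hx, hmax]
      rw [ih _ _ (le_trans hb (le_max_left _ _))]
      rw [posSum_cons_pos x t hx]
      simp [List.foldl_cons, add_assoc]
    · simp only [S_min_v_altLoop, if_neg hx]
      rw [ih _ _ hb, posSum_cons_nonpos x t hx]
      have : max b x = b := max_eq_left (by omega)
      simp [List.foldl_cons, this]

/-- A's loop after the first step: every coefficient is `r - 1`, and it sums the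
    `< 0` prefix. -/
lemma loopA_succ (r : Int) (l : List Int) (i : Nat) (v : Int) :
    S_min_v_loopA r l (i + 1) v = v + (r - 1) * (l.takeWhile (fun x => x < 0)).sum := by
  induction l generalizing i v with
  | nil => simp [S_min_v_loopA]
  | cons a t ih =>
    by_cases ha : a ≥ 0
    · simp [S_min_v_loopA, ha, show ¬ a < 0 by omega]
    · have h0 : decide (a < 0) = true := by simp; omega
      simp only [S_min_v_loopA, if_neg ha, List.takeWhile_cons, h0, if_true, List.sum_cons]
      rw [ih]
      simp only [show ¬ (i + 1 = 0) by omega, if_false]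
      ring

/-- In a `≤`-sorted list the `< 0` prefix is exactly the negative elements. -/
lemma takeWhile_neg_eq_filter (l : List Int) (h : l.Pairwise (· ≤ ·)) :
    l.takeWhile (fun x => x < 0) = l.filter (fun x => x < 0) := by
  induction l with
  | nil => rfl
  | cons a t ih =>
    rcases List.pairwise_cons.mp h with ⟨ha, ht⟩
    by_cases h0 : a < 0
    · simp [h0, ih ht]
    · have hnil : List.filter (fun x => decide (x < 0)) t = [] := by
        rw [List.filter_eq_nil_iff]
        intro x hx
        have := ha x hx
        simp
        omega
      simp [h0, hnil]

/-- Sum of negative elements of the negated list is minus the positive sum. -/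
lemma sum_filter_neg_map_neg (s : List Int) :
    ((s.map (fun x => -x)).filter (fun x => x < 0)).sum = -posSum s := by
  induction s with
  | nil => simp [posSum]
  | cons a t ih =>
    by_cases ha : 0 < a
    · have h1 : ((-a : Int) < 0) := by omega
      rw [List.map_cons, List.filter_cons]
      simp only [h1, decide_true, if_true, List.sum_cons, ih]
      rw [posSum_cons_pos a t ha]
      ring
    · have h1 : ¬ ((-a : Int) < 0) := by omega
      rw [List.map_cons, List.filter_cons]
      simp only [h1, decide_false, Bool.false_eq_true, if_false, ih]
      rw [posSum_cons_nonpos a t ha]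

/-- `foldl max b` is at most any upper bound of `b` and the list. -/
lemma foldl_max_le (s : List Int) (b a : Int) (hb : b ≤ a) (h : ∀ x ∈ s, x ≤ a) :
    s.foldl max b ≤ a := by
  induction s generalizing b with
  | nil => simpa
  | cons x t ih =>
    exact ih (max b x) (max_le hb (h x (by simp))) (fun y hy => h y (by simp [hy]))

lemma A_closed (r : Int) (s : List Int) :
    S_min_v r s = -(r - 1) * posSum s - s.foldl max 0 := by
  unfold S_min_v
  set l := PySem.List.sorted (s.map (fun x => -x)) (fun x => x) false with hl
  have hperm : l.Perm (s.map (fun x => -x)) := PySem.List.sorted_perm _ _ _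
  have hpw : l.Pairwise (· ≤ ·) := by
    simpa using PySem.List.sorted_pairwise (s.map (fun x => -x)) (fun x => x)
  cases hc : l with
  | nil =>
    have hmnil : s.map (fun x => -x) = [] := ((hc ▸ hperm).symm).eq_nil
    have hs : s = [] := List.map_eq_nil_iff.mp hmnil
    subst hs
    simp [S_min_v_loopA, posSum]
  | cons m t =>
    have hhead : ∀ y ∈ s.map (fun x => -x), m ≤ y :=
      PySem.List.key_head_sorted_le (s.map (fun x => -x)) (fun x => x) (hl.symm.trans hc)
    have hub : ∀ x ∈ s, x ≤ -m := by
      intro x hx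
      have := hhead (-x) (List.mem_map.mpr ⟨x, hx, rfl⟩)
      omega
    by_cases hm : m ≥ 0
    · have hnopos : ∀ x ∈ s, ¬ (0 < x) := fun x hx => by have := hub x hx; omega
      have h1 : posSum s = 0 := by
        have hnil : List.filter (fun x => decide (0 < x)) s = [] := by
          rw [List.filter_eq_nil_iff]
          intro x hx
          have := hnopos x hx
          simp
          omega
        simp [posSum, hnil]
      have h2 : s.foldl max 0 = 0 :=
        le_antisymm (foldl_max_le s 0 0 le_rfl (fun x hx => by have := hnopos x hx; omega))
          (PySem.List.le_foldl_max s 0).1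
      simp [S_min_v_loopA, hm, h1, h2]
    · rw [ge_iff_le, not_le] at hm
      have hms : -m ∈ s := by
        have hmem : m ∈ s.map (fun x => -x) := hperm.mem_iff.mp (by simp [hc])
        rcases List.mem_map.mp hmem with ⟨x, hx, hxe⟩
        have hxm : x = -m := by omega
        exact hxm ▸ hx
      have hbest : s.foldl max 0 = -m :=
        le_antisymm (foldl_max_le s 0 (-m) (by omega) hub)
          ((PySem.List.le_foldl_max s 0).2 (-m) hms)
      have hpwt : t.Pairwise (· ≤ ·) := (List.pairwise_cons.mp (hc ▸ hpw)).2
      have htw : (t.takeWhile (fun x => x < 0)).sum = -posSum s - m := by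
        rw [takeWhile_neg_eq_filter t hpwt]
        have hfl : (l.filter (fun x => x < 0)).sum = -posSum s := by
          rw [List.Perm.sum_eq (hperm.filter _), sum_filter_neg_map_neg]
        rw [hc, List.filter_cons] at hfl
        simp only [show decide (m < 0) = true by simp; omega, if_true, List.sum_cons] at hfl
        omega
      rw [show S_min_v_loopA r (m :: t) 0 0 = S_min_v_loopA r t 1 (0 + m * r) by
        simp [S_min_v_loopA, show ¬ m ≥ 0 by omega]]
      rw [loopA_succ r t 0, htw, hbest]
      ring

lemma B_closed (r : Int) (s : List Int) :
    S_min_v_alt r s = -(r - 1) * posSum s - s.foldl max 0 := by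
  unfold S_min_v_alt
  rw [altLoop_spec s 0 0 le_rfl]
  simp

-- ===== VERDICT (by name: the statement is the Claim_ definition above) =====
theorem S_min_v_spec : Claim_equal_S_min_v := by
  intro r s _
  unfold Spec_S_min_v
  rw [A_closed, B_closed]
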